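-- pv_equiv track=rewrite | github.com/ewush956/Computer-Vision-Schematic-Parser | schematics/routing.py | _collapse_orthogonal_collinear
-- ===== SOURCE A (Python) =====
-- Point = tuple[int, int]
--
-- def _collapse_orthogonal_collinear(pts: list[Point]) -> list[Point]:
--     """Same as :func:`simplify_path` but dedupes consecutive identical points
--     too, orthogonalization can produce zero-length steps."""
--     if not pts:
--         return []
--     out: list[Point] = [pts[0]]
--     for p in pts[1:]:
--         if p == out[-1]:
--             continue
--         if len(out) >= 2:
--             ax, ay = out[-2]
--             bx, by = out[-1]
--             cx, cy = p
--             if (ax == bx == cx) or (ay == by == cy):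
--                 # Replace the middle point — a, b, c are collinear.
--                 out[-1] = p
--                 continue
--         out.append(p)
--     return out
-- ===== SOURCE B (Python) =====
-- Point = tuple[int, int]
--
-- def _collapse_orthogonal_collinear(pts: list[Point]) -> list[Point]:
--     # Two passes: dedupe consecutive duplicates, then collapse orthogonal
--     # collinear runs with an output stack (single non-cascading replacement).
--     dedup: list[Point] = []
--     for p in pts:
--         if not dedup or p != dedup[-1]:
--             dedup.append(p)
--     out: list[Point] = []
--     for p in dedup:
--         if len(out) >= 2 and (
--             (out[-2][0] == out[-1][0] == p[0]) or (out[-2][1] == out[-1][1] == p[1])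
--         ):
--             out[-1] = p
--         else:
--             out.append(p)
--     return out
-- ===== Notes on version B (the rewrite author's own statement) =====
-- stated objective: simpler
-- what changed: A's single loop interleaving duplicate-skipping with the collinear middle-point replacement is split into two separate linear passes: first consecutive dedupe, then a stack-based collinear collapse.
import Mathlib
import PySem

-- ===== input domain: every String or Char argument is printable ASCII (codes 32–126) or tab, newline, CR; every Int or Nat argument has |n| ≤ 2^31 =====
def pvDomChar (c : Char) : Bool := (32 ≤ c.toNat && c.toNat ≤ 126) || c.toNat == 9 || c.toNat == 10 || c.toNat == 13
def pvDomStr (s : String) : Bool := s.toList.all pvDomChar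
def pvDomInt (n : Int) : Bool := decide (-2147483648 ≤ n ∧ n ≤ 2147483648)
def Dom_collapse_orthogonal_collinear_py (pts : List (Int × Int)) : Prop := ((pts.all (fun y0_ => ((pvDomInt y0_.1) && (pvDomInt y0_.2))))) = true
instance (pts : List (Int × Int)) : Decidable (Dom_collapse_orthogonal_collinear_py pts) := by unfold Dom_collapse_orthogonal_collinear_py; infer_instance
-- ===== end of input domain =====

-- B replaces A's single interleaved loop by two separate passes (consecutive
-- dedupe, then stack-based collinear collapse); objective: simpler decomposition.

-- ===== PORT A =====
-- A's single loop; `out` kept in reverse (head = out[-1]), reversed at the end.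
def pvStepA (out : List (Int × Int)) (p : Int × Int) : List (Int × Int) :=
  match out with
  | b :: rest =>
    if p = b then out                    -- `if p == out[-1]: continue`
    else
      match rest with
      | a :: _ =>                        -- `len(out) >= 2`
        if (a.1 = b.1 ∧ b.1 = p.1) ∨ (a.2 = b.2 ∧ b.2 = p.2) then
          p :: rest                      -- `out[-1] = p`
        else p :: out                    -- `out.append(p)`
      | [] => p :: out
  | [] => [p]                            -- unreachable: out starts nonempty

def collapse_orthogonal_collinear_py (pts : List (Int × Int)) : List (Int × Int) :=
  match pts with
  | [] => []
  | h :: t => (t.foldl pvStepA [h]).reverse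

-- ===== PORT B =====
-- Pass 1: consecutive dedupe (accumulator reversed, head = dedup[-1]).
def pvDedupStep (acc : List (Int × Int)) (p : Int × Int) : List (Int × Int) :=
  match acc with
  | q :: _ => if p = q then acc else p :: acc
  | [] => [p]

-- Pass 2: stack collapse (stack reversed, head = out[-1]).
def pvStepB (out : List (Int × Int)) (p : Int × Int) : List (Int × Int) :=
  match out with
  | b :: a :: rest =>
    if (a.1 = b.1 ∧ b.1 = p.1) ∨ (a.2 = b.2 ∧ b.2 = p.2) then
      p :: a :: rest                     -- `out[-1] = p`
    else p :: b :: a :: rest             -- `out.append(p)`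
  | _ => p :: out

def collapse_orthogonal_collinear_py_alt (pts : List (Int × Int)) : List (Int × Int) :=
  (((pts.foldl pvDedupStep []).reverse).foldl pvStepB []).reverse

-- ===== PRECONDITION & SPEC =====
def Spec_collapse_orthogonal_collinear_py (pts : List (Int × Int)) (out : List (Int × Int)) : Prop := out = collapse_orthogonal_collinear_py_alt pts
instance (pts : List (Int × Int)) (out : List (Int × Int)) : Decidable (Spec_collapse_orthogonal_collinear_py pts out) := by unfold Spec_collapse_orthogonal_collinear_py; infer_instance

-- ===== CLAIM (what is proved, stated in full; the proofs are below) =====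
def Claim_equal_collapse_orthogonal_collinear_py : Prop := ∀ (pts : List (Int × Int)), Dom_collapse_orthogonal_collinear_py pts → Spec_collapse_orthogonal_collinear_py pts (collapse_orthogonal_collinear_py pts)

-- ===== LEMMAS AND PROOFS =====

-- Reference consecutive dedupe relative to a previous kept point.
def pvDd (prev : Int × Int) : List (Int × Int) → List (Int × Int)
  | [] => []
  | p :: t => if p = prev then pvDd prev t else p :: pvDd p t

theorem pvDedup_foldl (t : List (Int × Int)) :
    ∀ (prev : Int × Int) (acc : List (Int × Int)),
      t.foldl pvDedupStep (prev :: acc) = (pvDd prev t).reverse ++ (prev :: acc) := by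
  induction t with
  | nil => intro prev acc; simp [pvDd]
  | cons p t ih =>
    intro prev acc
    by_cases h : p = prev
    · simp [pvDd, h, pvDedupStep, ih]
    · simp [pvDd, h, pvDedupStep, ih]

theorem pvMain (t : List (Int × Int)) :
    ∀ (prev : Int × Int) (acc : List (Int × Int)),
      t.foldl pvStepA (prev :: acc) = (pvDd prev t).foldl pvStepB (prev :: acc) := by
  induction t with
  | nil => intro prev acc; simp [pvDd]
  | cons p t ih =>
    intro prev acc
    by_cases h : p = prev
    · simp [pvDd, h, pvStepA, ih]
    · cases acc with
      | nil =>
        simp only [pvDd, List.foldl_cons, pvStepA, if_neg h, pvStepB]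
        exact ih p [prev]
      | cons a rest =>
        simp only [pvDd, List.foldl_cons, pvStepA, if_neg h, pvStepB]
        by_cases hc : (a.1 = prev.1 ∧ prev.1 = p.1) ∨ (a.2 = prev.2 ∧ prev.2 = p.2)
        · simp only [if_pos hc]; exact ih p (a :: rest)
        · simp only [if_neg hc]; exact ih p (prev :: a :: rest)

-- ===== VERDICT (by name: the statement is the Claim_ definition above) =====
theorem collapse_orthogonal_collinear_py_spec : Claim_equal_collapse_orthogonal_collinear_py := by
  intro pts _
  show collapse_orthogonal_collinear_py pts = collapse_orthogonal_collinear_py_alt pts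
  cases pts with
  | nil => rfl
  | cons h t =>
    simp only [collapse_orthogonal_collinear_py, collapse_orthogonal_collinear_py_alt,
      List.foldl_cons, pvDedupStep, pvDedup_foldl t h ([] : List (Int × Int))]
    simp only [List.reverse_append, List.reverse_reverse, List.reverse_cons,
      List.reverse_nil, List.nil_append, List.singleton_append, List.foldl_cons]
    have : pvStepB [] h = [h] := rfl
    rw [this, pvMain t h []]
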